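-- pv_equiv track=rewrite | github.com/pypi-data/pypi-mirror-350 | packages/turintech-evoml-preprocessor/turintech_evoml_preprocessor-5.1.1-py3-none-any.whl/evoml_preprocessor/reports/utils.py | construct_table_entry
-- ===== SOURCE A (Python) =====
-- from typing import Any, List
--
-- def construct_table_entry(items: List[str], size_limit: int = 75) -> str:
--     """Converts a list of (string) items into a single line, limited to a given
--     size (default: 75 chars).
--     Does so by joining lines with ', ' and adding a postfix indicating the
--     number of hidden items if the line is above the limit.
--     Args:
--         items (List[str]):
--             The list of items to be joined.
--         size_limit (int):
--             The maximum size of the output string.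
--     Returns:
--         str:
--             The joined string.
--     """
--     # if there is only one item, ignore the size limit
--     if len(items) == 1:
--         return items[0]
--     entry = ", ".join(items)
--     # if the whole list fit in the size limit, return the whole list as a string
--     if len(entry) <= size_limit:
--         return entry
--     n_items = len(items)
--     postfix = " ({} more)"
--     # find the maximum number of items that can fit in the limit
--     entry = entry[:size_limit]  # we first cut off the string at the size limit
--     last_comma_index = entry.rfind(",")
--     if last_comma_index > 0:  # if there is more than one full item in the entry
--         # remove anything on and after the last comma
--         # (even if the item after the last comma fully fitted in the entry,
--         # we still need space for the postfix)
--         entry = entry[:last_comma_index]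
--         n_fitted_items = entry.count(",") + 1
--         # try to fit the postfix within the limit, remove more items from the entry if necessary
--         # but we should never remove the first item
--         entry = ", ".join(items[:n_fitted_items]) + postfix.format(n_items - n_fitted_items)
--         while len(entry) > size_limit and n_fitted_items > 1:
--             n_fitted_items -= 1
--             entry = ", ".join(items[:n_fitted_items]) + postfix.format(n_items - n_fitted_items)
--     else:  # there is only one item (or an partial item) in the entry
--         # we will have to ignore the size limit and fit at least one item in the entry
--         entry = items[0] + postfix.format(n_items - 1)
--
--     return entry
-- ===== SOURCE B (Python) =====
-- from typing import List
--
--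
-- def construct_table_entry(items: List[str], size_limit: int = 75) -> str:
--     # if there is only one item, ignore the size limit
--     if len(items) == 1:
--         return items[0]
--     entry = ", ".join(items)
--     # if the whole list fits in the size limit, return it whole
--     if len(entry) <= size_limit:
--         return entry
--     n = len(items)
--     # forward pass: running joined length of the first k items; keep the
--     # largest k whose join plus the " (N more)" postfix fits, stop at the
--     # first k that does not fit
--     best = 0
--     run = 0
--     for k, item in enumerate(items[:-1], start=1):
--         run += len(item) + (2 if k > 1 else 0)
--         if run + len(" ({} more)".format(n - k)) <= size_limit:
--             best = k
--         else:
--             break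
--     best = max(1, best)  # never drop the first item
--     return ", ".join(items[:best]) + " ({} more)".format(n - best)
-- ===== Notes on version B (the rewrite author's own statement) =====
-- stated objective: simpler
-- what changed: Replaces A's cut-at-size_limit / rfind-last-comma / count-commas string surgery and its shrinking while-loop by a single forward pass over item lengths that keeps the largest prefix count whose join plus the postfix fits.
-- outside the precondition, e.g. on construct_table_entry([], -1): A raises IndexError, B returns ' (-1 more)'
import Mathlib
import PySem

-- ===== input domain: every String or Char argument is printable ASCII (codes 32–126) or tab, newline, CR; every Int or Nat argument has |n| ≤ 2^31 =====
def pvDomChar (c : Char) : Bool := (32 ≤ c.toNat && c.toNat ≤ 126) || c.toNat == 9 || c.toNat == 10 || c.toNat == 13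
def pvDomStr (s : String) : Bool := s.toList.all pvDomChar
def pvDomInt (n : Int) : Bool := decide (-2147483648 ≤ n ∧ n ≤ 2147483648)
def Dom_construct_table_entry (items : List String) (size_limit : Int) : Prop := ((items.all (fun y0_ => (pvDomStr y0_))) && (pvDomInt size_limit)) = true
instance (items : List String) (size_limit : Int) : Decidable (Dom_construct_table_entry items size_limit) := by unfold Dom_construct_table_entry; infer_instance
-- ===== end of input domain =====

-- B replaces A's cut-the-joined-string / rfind / comma-count surgery and shrink-loop
-- by a single forward pass over item lengths (objective: simpler).


-- shared literal: Python's ' ({} more)'.format(k)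
def pyPostfixFmt (k : Int) : String := " (" ++ PySem.Int.toStr k ++ " more)"

-- ===== PORT A =====
-- the 'while len(entry) > size_limit and n_fitted > 1' loop of A
def construct_table_entry_while (items : List String) (size_limit n_items : Int) :
    Nat → String → String
  | n_fitted, entry =>
    if _h : size_limit < PySem.Str.len entry ∧ 1 < n_fitted then
      construct_table_entry_while items size_limit n_items (n_fitted - 1)
        (PySem.Str.join ", " (PySem.List.slice items none (some ((n_fitted - 1 : Nat) : Int)))
          ++ pyPostfixFmt (n_items - ((n_fitted - 1 : Nat) : Int)))
    else entry
  termination_by n_fitted _ => n_fitted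
  decreasing_by omega

def construct_table_entry (items : List String) (size_limit : Int) : String :=
  if items.length = 1 then (PySem.List.pyGet? items 0).getD "" else
  let entry := PySem.Str.join ", " items
  if PySem.Str.len entry ≤ size_limit then entry else
  let n_items : Int := items.length
  let entry := PySem.Str.slice entry none (some size_limit)
  let last_comma_index := PySem.Str.rfind entry ","
  if 0 < last_comma_index then
    let entry := PySem.Str.slice entry none (some last_comma_index)
    let n_fitted : Nat := PySem.Str.count entry "," + 1
    construct_table_entry_while items size_limit n_items n_fitted
      (PySem.Str.join ", " (PySem.List.slice items none (some (n_fitted : Int)))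
        ++ pyPostfixFmt (n_items - (n_fitted : Int)))
  else
    (PySem.List.pyGet? items 0).getD "" ++ pyPostfixFmt (n_items - 1)

-- ===== PORT B =====
-- forward pass of B: for k, item in enumerate(items[:-1], start=1), tracking run and best,
-- breaking at the first k that does not fit
def pvFitLoop (size_limit n : Int) : List String → Nat → Int → Nat → Nat
  | [], _, _, best => best
  | item :: rest, k, run, best =>
    let run := run + PySem.Str.len item + (if 1 < k then 2 else 0)
    if run + PySem.Str.len (pyPostfixFmt (n - (k : Int))) ≤ size_limit then
      pvFitLoop size_limit n rest (k + 1) run k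
    else best

def construct_table_entry_alt (items : List String) (size_limit : Int) : String :=
  if items.length = 1 then (PySem.List.pyGet? items 0).getD "" else
  let entry := PySem.Str.join ", " items
  if PySem.Str.len entry ≤ size_limit then entry else
  let n : Int := items.length
  let best := pvFitLoop size_limit n items.dropLast 1 0 0
  let best := max 1 best
  PySem.Str.join ", " (items.take best) ++ pyPostfixFmt (n - (best : Int))

-- ===== PRECONDITION & SPEC =====
-- Pre_ excludes only an empty items list combined with a negative size_limit, where A raises IndexError.
def Pre_construct_table_entry (items : List String) (size_limit : Int) : Prop :=
  items ≠ [] ∨ 0 ≤ size_limit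
instance (items : List String) (size_limit : Int) : Decidable (Pre_construct_table_entry items size_limit) := by unfold Pre_construct_table_entry; infer_instance
def pvWitness_construct_table_entry : List String × Int := (["alpha", "beta", "gamma"], 9)

def Spec_construct_table_entry (items : List String) (size_limit : Int) (out : String) : Prop := out = construct_table_entry_alt items size_limit
instance (items : List String) (size_limit : Int) (out : String) : Decidable (Spec_construct_table_entry items size_limit out) := by unfold Spec_construct_table_entry; infer_instance

-- ===== CLAIM (what is proved, stated in full; the proofs are below) =====
def Claim_equal_construct_table_entry : Prop := ∀ (items : List String) (size_limit : Int), Dom_construct_table_entry items size_limit → Pre_construct_table_entry items size_limit → Spec_construct_table_entry items size_limit (construct_table_entry items size_limit)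

-- ===== LEMMAS AND PROOFS =====

-- length of the joined prefix of the first k items (valid for 1 ≤ k)
def pvLN (items : List String) (k : Nat) : Nat :=
  ((items.take k).map (fun s => s.toList.length)).sum + 2 * (k - 1)

-- length of the postfix " (m more)"
def pvPlen (m : Int) : Int := PySem.Str.len (pyPostfixFmt m)

-- does a k-item prefix plus postfix fit?
def pvFit (items : List String) (size_limit : Int) (k : Nat) : Prop :=
  (pvLN items k : Int) + pvPlen ((items.length : Int) - (k : Int)) ≤ size_limit

-- the candidate output for a prefix count j
def pvMkE (items : List String) (j : Nat) : String :=
  PySem.Str.join ", " (items.take j) ++ pyPostfixFmt ((items.length : Int) - (j : Int))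

-- ---- digit-length lemmas ----
lemma pv_toDigitsCore_len (f : Nat) : ∀ n, n < f → (Nat.toDigitsCore 10 f n []).length = Nat.log 10 n + 1 := by
  induction f with
  | zero => intro n h; omega
  | succ f ih =>
    intro n h
    rw [Nat.toDigitsCore]
    by_cases hx : n / 10 = 0
    · simp only [hx, if_true, List.length]
      have : n < 10 := by omega
      rw [Nat.log_eq_zero_iff.mpr (Or.inl this)]
    · simp only [hx, if_false]
      rw [Nat.toDigitsCore_lens_eq, ih (n / 10) (by omega)]
      have h10 : 10 ≤ n := by omega
      have := Nat.log_div_base 10 n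
      have hpos : 0 < Nat.log 10 n := Nat.log_pos (by norm_num) h10
      omega

lemma pv_toDigits_len (n : Nat) : (Nat.toDigits 10 n).length = Nat.log 10 n + 1 := by
  rw [Nat.toDigits]; exact pv_toDigitsCore_len (n+1) n (by omega)

lemma pv_plen_nat (m : Nat) : pvPlen (m : Int) = 8 + (Nat.log 10 m : Int) + 1 := by
  have hneg : ¬((m : Int) < 0) := by omega
  simp [pvPlen, pyPostfixFmt, PySem.Str.len, PySem.Int.toStr, PySem.Int.toChars,
    String.toList_append, hneg, pv_toDigits_len]
  omega

lemma pv_plen_mono (m : Nat) (h : 1 ≤ m) :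
    pvPlen ((m : Int) + 1) ≤ pvPlen (m : Int) + 1 := by
  have h1 : ((m : Int) + 1) = ((m + 1 : Nat) : Int) := by push_cast; ring
  rw [h1, pv_plen_nat, pv_plen_nat]
  have : Nat.log 10 (m + 1) ≤ Nat.log 10 m + 1 := by
    have h2 : m + 1 ≤ m * 10 := by omega
    calc Nat.log 10 (m+1) ≤ Nat.log 10 (m*10) := Nat.log_mono_right h2
    _ = Nat.log 10 m + 1 := Nat.log_mul_base (by norm_num) (by omega)
  omega

-- ---- join-length lemmas ----
lemma pv_join_len (parts : List (List Char)) (h : parts ≠ []) :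
    (PySem.Chars.join [',', ' '] parts).length
      = (parts.map (fun p => p.length)).sum + 2 * (parts.length - 1) := by
  induction parts with
  | nil => simp at h
  | cons x t ih =>
    cases t with
    | nil => simp [PySem.Chars.join_singleton]
    | cons y t' =>
      rw [PySem.Chars.join_cons_cons]
      simp only [List.length_append, List.map_cons, List.sum_cons, List.length_cons]
      rw [ih (by simp)]
      simp only [List.map_cons, List.sum_cons, List.length]
      omega

lemma pv_join_append (xs ys : List (List Char)) (hx : xs ≠ []) (hy : ys ≠ []) :
    PySem.Chars.join [',', ' '] (xs ++ ys)
      = PySem.Chars.join [',', ' '] xs ++ [',', ' '] ++ PySem.Chars.join [',', ' '] ys := by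
  induction xs with
  | nil => simp at hx
  | cons x t ih =>
    cases t with
    | nil =>
      cases ys with
      | nil => simp at hy
      | cons y t' => simp [PySem.Chars.join_cons_cons, PySem.Chars.join_singleton]
    | cons x' t' =>
      show PySem.Chars.join [',', ' '] (x :: x' :: (t' ++ ys)) = _
      rw [PySem.Chars.join_cons_cons, PySem.Chars.join_cons_cons]
      have := ih (by simp)
      simp only [List.cons_append] at this
      rw [this]
      simp

lemma pv_strjoin_len (items : List String) (k : Nat) (h1 : 1 ≤ k) (hk : k ≤ items.length) :
    PySem.Str.len (PySem.Str.join ", " (items.take k)) = (pvLN items k : Int) := by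
  rw [PySem.Str.len, PySem.Str.toList_join]
  have hsep : (", ").toList = [',', ' '] := by decide
  rw [hsep, pv_join_len _ (by
    intro hnil
    have := congrArg List.length hnil
    rw [List.length_map, List.length_take, List.length_nil] at this
    omega)]
  simp [pvLN, List.map_map, Function.comp_def, min_eq_left hk]

lemma pv_strjoin_len_nat (items : List String) (k : Nat) (h1 : 1 ≤ k) (hk : k ≤ items.length) :
    (PySem.Str.join ", " (items.take k)).toList.length = pvLN items k := by
  have := pv_strjoin_len items k h1 hk
  rw [PySem.Str.len] at this
  exact_mod_cast this

lemma pv_LN_step (items : List String) (k : Nat) (h1 : 1 ≤ k) (hk : k < items.length) :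
    pvLN items (k + 1) = pvLN items k + 2 + (items.get ⟨k, hk⟩).toList.length := by
  unfold pvLN
  have h2 : items.take (k+1) = items.take k ++ [items.get ⟨k, hk⟩] := by
    rw [List.take_add_one]
    simp [List.getElem?_eq_getElem hk]
  rw [h2, List.map_append, List.sum_append]
  simp
  omega

lemma pv_join_split (items : List String) (k : Nat) (h1 : 1 ≤ k) (hk : k < items.length) :
    ∃ rest, (PySem.Str.join ", " items).toList
      = (PySem.Str.join ", " (items.take k)).toList ++ [',', ' '] ++ rest := by
  refine ⟨PySem.Chars.join [',', ' '] ((items.drop k).map String.toList), ?_⟩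
  rw [PySem.Str.toList_join, PySem.Str.toList_join]
  have hsep : (", ").toList = [',', ' '] := by decide
  rw [hsep]
  conv_lhs => rw [← List.take_append_drop k items]
  rw [List.map_append]
  exact pv_join_append _ _
    (by intro hnil; have := congrArg List.length hnil
        rw [List.length_map, List.length_take, List.length_nil] at this; omega)
    (by intro hnil; have := congrArg List.length hnil
        rw [List.length_map, List.length_drop, List.length_nil] at this; omega)

-- ---- rfind / count lemmas ----
lemma pv_rfind_go_ge (s : List Char) (i : Nat) : ∀ jm, i ≤ jm →
    [','].isPrefixOf (s.drop i) → (i : Int) ≤ PySem.Chars.rfind.go s [','] jm := by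
  intro jm
  induction jm with
  | zero =>
    intro hij hi
    have : i = 0 := by omega
    subst this
    simp only [List.drop_zero] at hi
    simp [PySem.Chars.rfind.go, hi]
  | succ j ih =>
    intro hij hi
    rw [PySem.Chars.rfind.go]
    by_cases hp : [','].isPrefixOf (s.drop (j+1))
    · simp only [hp, if_true]
      exact_mod_cast Int.ofNat_le.mpr hij
    · simp only [hp, Bool.false_eq_true, if_false]
      have : i ≠ j + 1 := fun he => hp (he ▸ hi)
      exact ih (by omega) hi

lemma pv_rfind_ge (s : List Char) (i : Nat) (hi : (s.drop i).head? = some ',') :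
    (i : Int) ≤ PySem.Chars.rfind s [','] := by
  have hlt : i ≤ s.length := by
    by_contra h
    rw [List.drop_eq_nil_of_le (by omega)] at hi
    simp at hi
  have hp : [','].isPrefixOf (s.drop i) := by
    cases hd : s.drop i with
    | nil => rw [hd] at hi; simp at hi
    | cons c t =>
      rw [hd] at hi
      simp at hi
      simp [List.isPrefixOf, hi]
  exact pv_rfind_go_ge s i s.length hlt hp

lemma pv_count_go (fuel : Nat) : ∀ (s : List Char) (acc : Nat), s.length ≤ fuel →
    PySem.Chars.count.go [','] fuel s acc = acc + s.count ',' := by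
  induction fuel with
  | zero =>
    intro s acc h
    have : s = [] := by
      cases s with
      | nil => rfl
      | cons a t => simp at h
    subst this
    simp [PySem.Chars.count.go]
  | succ f ih =>
    intro s acc h
    cases s with
    | nil => simp [PySem.Chars.count.go]
    | cons c t =>
      rw [PySem.Chars.count.go]
      by_cases hc : c = ','
      · subst hc
        have hp : [','].isPrefixOf (',' :: t) = true := by simp [List.isPrefixOf]
        simp only [hp, if_true]
        rw [show (List.drop [','].length (',' :: t)) = t by simp]
        rw [ih t (acc+1) (by simp at h; omega)]
        simp
        omega
      · have hp : [','].isPrefixOf (c :: t) = false := by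
          simp [List.isPrefixOf]
          exact fun he => hc he.symm
        simp only [hp, Bool.false_eq_true, if_false]
        rw [ih t acc (by simp at h; omega)]
        simp [hc]

lemma pv_count_eq (s : List Char) : PySem.Chars.count s [','] = s.count ',' := by
  rw [PySem.Chars.count]
  rw [if_neg (by simp)]
  rw [pv_count_go s.length s 0 (le_refl _)]
  omega

-- at least k commas in the prefix of the join reaching through the k-th separator
lemma pv_comma_count (items : List String) : ∀ (k : Nat), 1 ≤ k → k < items.length →
    k ≤ (((PySem.Str.join ", " items).toList).take (pvLN items k + 1)).count ',' := by
  intro k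
  induction k with
  | zero => intro h; omega
  | succ k ih =>
    intro _ hk
    obtain ⟨rest, hsplit⟩ := pv_join_split items (k+1) (by omega) hk
    have hlen : (PySem.Str.join ", " (items.take (k+1))).toList.length = pvLN items (k+1) :=
      pv_strjoin_len_nat items (k+1) (by omega) (by omega)
    have htake : ((PySem.Str.join ", " items).toList).take (pvLN items (k+1) + 1)
        = (PySem.Str.join ", " (items.take (k+1))).toList ++ [','] := by
      rw [hsplit, List.append_assoc, ← hlen, List.take_append]
      simp
    rw [htake, List.count_append]
    have hone : List.count ',' [','] = 1 := by decide
    rw [hone]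
    by_cases hk1 : k = 0
    · subst hk1; omega
    · have h1k : 1 ≤ k := by omega
      have ihk := ih h1k (by omega)
      have hmono : pvLN items k + 1 ≤ pvLN items (k+1) := by
        rw [pv_LN_step items k h1k (by omega)]
        omega
      have hpref : ((PySem.Str.join ", " items).toList).take (pvLN items k + 1)
          <+: (PySem.Str.join ", " (items.take (k+1))).toList := by
        rw [hsplit, List.append_assoc, List.take_append_of_le_length (by omega)]
        exact List.take_prefix _ _
      have := List.IsPrefix.count_le ',' hpref
      omega

-- ---- fit monotonicity ----
lemma pv_fit_mono (items : List String) (sl : Int) (k : Nat) (h1 : 1 ≤ k)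
    (hk : k + 1 ≤ items.length - 1) (hf : ¬ pvFit items sl k) : ¬ pvFit items sl (k + 1) := by
  intro hfit
  apply hf
  unfold pvFit at hfit ⊢
  have hkn : k < items.length := by omega
  have hstep := pv_LN_step items k h1 hkn
  have hstepZ : (pvLN items (k+1) : Int)
      = (pvLN items k : Int) + 2 + ((items.get ⟨k, hkn⟩).toList.length : Int) := by
    rw [hstep]; push_cast; ring
  set m : Nat := items.length - (k + 1) with hm
  have hm1 : 1 ≤ m := by omega
  have e1 : (items.length : Int) - ((k : Int) + 1) = (m : Int) := by omega
  have e2 : (items.length : Int) - (k : Int) = (m : Int) + 1 := by omega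
  have hp := pv_plen_mono m hm1
  push_cast at hfit ⊢
  rw [e1] at hfit
  rw [e2]
  have hlen0 : (0 : Int) ≤ ((items.get ⟨k, hkn⟩).toList.length : Int) := by positivity
  omega

-- ---- small helpers ----
lemma pv_strlen_append (a b : String) :
    PySem.Str.len (a ++ b) = PySem.Str.len a + PySem.Str.len b := by
  simp [PySem.Str.len, String.toList_append]

lemma pv_plen_nonneg (m : Int) : 0 ≤ pvPlen m := by
  unfold pvPlen PySem.Str.len
  positivity

lemma pv_mkE_len (items : List String) (j : Nat) (h1 : 1 ≤ j) (hj : j ≤ items.length) :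
    PySem.Str.len (pvMkE items j)
      = (pvLN items j : Int) + pvPlen ((items.length : Int) - (j : Int)) := by
  unfold pvMkE
  rw [pv_strlen_append, pv_strjoin_len items j h1 hj]
  rfl

lemma pv_notfit_chain (items : List String) (sl : Int) (b : Nat) (hb : 1 ≤ b)
    (hnb : ¬ pvFit items sl b) : ∀ j, b ≤ j → j ≤ items.length - 1 → ¬ pvFit items sl j := by
  intro j
  induction j with
  | zero => intro h1 _; exact ((by omega : False)).elim
  | succ j ihj =>
    intro hbj hjn
    by_cases hbj1 : b = j + 1
    · subst hbj1; exact hnb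
    · exact pv_fit_mono items sl j (by omega) (by omega) (ihj (by omega) (by omega))

-- ---- properties of B's loop ----
lemma pv_fitLoop_go (items : List String) (sl : Int) (hn : 2 ≤ items.length) :
    ∀ d k, 1 ≤ k → k ≤ items.length → items.length - k = d →
      (k - 1 ≤ pvFitLoop sl (items.length : Int) ((items.drop (k-1)).dropLast) k
          (if k = 1 then 0 else (pvLN items (k-1) : Int)) (k-1) ∧
       pvFitLoop sl (items.length : Int) ((items.drop (k-1)).dropLast) k
          (if k = 1 then 0 else (pvLN items (k-1) : Int)) (k-1) ≤ items.length - 1 ∧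
       (∀ j, k ≤ j → j ≤ pvFitLoop sl (items.length : Int) ((items.drop (k-1)).dropLast) k
          (if k = 1 then 0 else (pvLN items (k-1) : Int)) (k-1) → pvFit items sl j) ∧
       (pvFitLoop sl (items.length : Int) ((items.drop (k-1)).dropLast) k
          (if k = 1 then 0 else (pvLN items (k-1) : Int)) (k-1) + 1 ≤ items.length - 1 →
        ¬ pvFit items sl (pvFitLoop sl (items.length : Int) ((items.drop (k-1)).dropLast) k
          (if k = 1 then 0 else (pvLN items (k-1) : Int)) (k-1) + 1))) := by
  intro d
  induction d with
  | zero =>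
    intro k hk1 hkn hd
    have hkeq : k = items.length := by omega
    have hnil : (items.drop (k-1)).dropLast = [] := by
      apply List.eq_nil_of_length_eq_zero
      rw [List.length_dropLast, List.length_drop]
      omega
    rw [hnil]
    simp only [pvFitLoop]
    refine ⟨le_refl _, by omega, ?_, ?_⟩
    · intro j hj1 hj2
      exact ((by omega : False)).elim
    · intro habs
      exact ((by omega : False)).elim
  | succ d ih =>
    intro k hk1 hkn hd
    have hklt : k < items.length := by omega
    have hk1lt : k - 1 < items.length := by omega
    have hdrop : items.drop (k-1) = items[k-1] :: items.drop k := by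
      have h := List.drop_eq_getElem_cons hk1lt
      rw [show k - 1 + 1 = k from by omega] at h
      exact h
    have htail : items.drop k ≠ [] := by
      intro hnil
      have := congrArg List.length hnil
      rw [List.length_drop, List.length_nil] at this
      omega
    have hcons : (items.drop (k-1)).dropLast = items[k-1] :: (items.drop k).dropLast := by
      rw [hdrop, List.dropLast_cons_of_ne_nil htail]
    rw [hcons]
    simp only [pvFitLoop]
    have hrun : (if k = 1 then 0 else (pvLN items (k-1) : Int)) + PySem.Str.len items[k-1]
        + (if 1 < k then 2 else 0) = (pvLN items k : Int) := by
      by_cases hk : k = 1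
      · subst hk
        simp only [if_neg (by omega : ¬ (1:Nat) < 1)]
        cases items with
        | nil => simp at hklt
        | cons a t =>
          simp [pvLN, PySem.Str.len]
      · have hstep := pv_LN_step items (k-1) (by omega) hk1lt
        rw [show k - 1 + 1 = k from by omega] at hstep
        rw [if_neg hk, if_pos (by omega : 1 < k)]
        rw [hstep]
        push_cast
        simp [PySem.Str.len, List.get_eq_getElem]
        ring
    rw [hrun]
    by_cases hfit : pvFit items sl k
    · rw [if_pos (by unfold pvFit at hfit; exact hfit)]
      have ihk := ih (k+1) (by omega) (by omega) (by omega)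
      rw [show k + 1 - 1 = k from by omega] at ihk
      rw [if_neg (by omega : ¬ k + 1 = 1)] at ihk
      obtain ⟨ih1, ih2, ih3, ih4⟩ := ihk
      refine ⟨by omega, ih2, ?_, ih4⟩
      intro j hj1 hj2
      by_cases hjk : j = k
      · subst hjk; exact hfit
      · exact ih3 j (by omega) hj2
    · rw [if_neg (by unfold pvFit at hfit; exact hfit)]
      refine ⟨le_refl _, by omega, by omega, ?_⟩
      intro _
      rw [show k - 1 + 1 = k from by omega]
      exact hfit

lemma pv_fitLoop_spec (items : List String) (sl : Int) (hn : 2 ≤ items.length) :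
    pvFitLoop sl (items.length : Int) items.dropLast 1 0 0 ≤ items.length - 1 ∧
    (∀ j, 1 ≤ j → j ≤ pvFitLoop sl (items.length : Int) items.dropLast 1 0 0 →
      pvFit items sl j) ∧
    (pvFitLoop sl (items.length : Int) items.dropLast 1 0 0 + 1 ≤ items.length - 1 →
      ¬ pvFit items sl (pvFitLoop sl (items.length : Int) items.dropLast 1 0 0 + 1)) := by
  have h := pv_fitLoop_go items sl hn (items.length - 1) 1 (le_refl _) (by omega) (by omega)
  simp only [Nat.sub_self, List.drop_zero] at h
  exact ⟨h.2.1, h.2.2.1, h.2.2.2⟩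

-- ---- A's while loop reaches the same prefix count ----
lemma pv_whileA_eq (items : List String) (sl : Int) (K : Nat) (hK : 1 ≤ K)
    (hstop : PySem.Str.len (pvMkE items K) ≤ sl ∨ K = 1)
    (hbig : ∀ j, K < j → sl < PySem.Str.len (pvMkE items j)) :
    ∀ nf, K ≤ nf →
      construct_table_entry_while items sl (items.length : Int) nf (pvMkE items nf)
        = pvMkE items K := by
  intro nf
  induction nf using Nat.strong_induction_on with
  | _ nf ih =>
    intro hnf
    rw [construct_table_entry_while]
    by_cases hcond : sl < PySem.Str.len (pvMkE items nf) ∧ 1 < nf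
    · rw [dif_pos hcond]
      have hKlt : K < nf := by
        rcases Nat.lt_or_ge K nf with h | h
        · exact h
        · exfalso
          have : K = nf := by omega
          subst this
          rcases hstop with hs | hs
          · omega
          · omega
      have hentry : PySem.Str.join ", " (PySem.List.slice items none (some ((nf - 1 : Nat) : Int)))
            ++ pyPostfixFmt ((items.length : Int) - ((nf - 1 : Nat) : Int))
          = pvMkE items (nf - 1) := by
        rw [PySem.List.slice_to_natCast]
        rfl
      rw [hentry]
      exact ih (nf - 1) (by omega) (by omega)
    · rw [dif_neg hcond]
      have : nf = K := by
        by_contra hne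
        have hlt : K < nf := by omega
        exact hcond ⟨hbig nf hlt, by omega⟩
      rw [this]

-- ---- the last comma of the truncated join lies at or beyond the Kb-th separator ----
lemma pv_lci_ge (items : List String) (sl : Int) (Kb : Nat) (hn2 : 2 ≤ items.length)
    (hKb2 : 2 ≤ Kb) (hKbn : Kb ≤ items.length - 1) (hfit : pvFit items sl Kb) :
    (pvLN items Kb : Int)
      ≤ PySem.Str.rfind (PySem.Str.slice (PySem.Str.join ", " items) none (some sl)) "," := by
  have hple : 9 ≤ pvPlen ((items.length : Int) - (Kb : Int)) := by
    have e : (items.length : Int) - (Kb : Int) = ((items.length - Kb : Nat) : Int) := by omega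
    rw [e, pv_plen_nat]
    have : (0:Int) ≤ (Nat.log 10 (items.length - Kb) : Int) := by positivity
    omega
  have hsl : (pvLN items Kb : Int) + 9 ≤ sl := by
    unfold pvFit at hfit; omega
  have hslnn : 0 ≤ sl := by
    have : (0:Int) ≤ (pvLN items Kb : Int) := by positivity
    omega
  obtain ⟨rest, hsplit⟩ := pv_join_split items Kb (by omega) (by omega)
  have hJlen := pv_strjoin_len_nat items Kb (by omega) (by omega)
  have hcut : (PySem.Str.slice (PySem.Str.join ", " items) none (some sl)).toList
      = List.take sl.toNat (PySem.Str.join ", " items).toList := by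
    rw [PySem.Str.toList_slice]
    exact PySem.List.slice_to _ hslnn
  have hhead : (((PySem.Str.slice (PySem.Str.join ", " items) none (some sl)).toList).drop
      (pvLN items Kb)).head? = some ',' := by
    rw [hcut, hsplit, List.append_assoc]
    have hx : ([',', ' '] : List Char) ++ rest = ',' :: ' ' :: rest := rfl
    rw [hx]
    rw [show sl.toNat = (PySem.Str.join ", " (items.take Kb)).toList.length
        + (sl.toNat - pvLN items Kb) from by rw [hJlen]; omega]
    rw [List.take_append, List.take_of_length_le (by omega), Nat.add_sub_cancel_left]
    rw [show pvLN items Kb = (PySem.Str.join ", " (items.take Kb)).toList.length from hJlen.symm]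
    rw [List.drop_left]
    obtain ⟨e, he⟩ : ∃ e, sl.toNat - pvLN items Kb = e + 1 :=
      ⟨sl.toNat - pvLN items Kb - 1, by omega⟩
    rw [hJlen, he, List.take_succ_cons]
    rfl
  have h := pv_rfind_ge _ (pvLN items Kb) hhead
  rw [PySem.Str.rfind_eq, show (("," : String).toList) = [','] from by decide]
  exact h

-- ---- the comma count of the cut recovers at least Kb items ----
lemma pv_nfit_ge (items : List String) (sl lci : Int) (Kb : Nat) (hn2 : 2 ≤ items.length)
    (hKb2 : 2 ≤ Kb) (hKbn : Kb ≤ items.length - 1) (hfit : pvFit items sl Kb)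
    (hlci : (pvLN items Kb : Int) ≤ lci) :
    Kb ≤ PySem.Str.count (PySem.Str.slice (PySem.Str.slice (PySem.Str.join ", " items) none
      (some sl)) none (some lci)) "," + 1 := by
  have hple : 9 ≤ pvPlen ((items.length : Int) - (Kb : Int)) := by
    have e : (items.length : Int) - (Kb : Int) = ((items.length - Kb : Nat) : Int) := by omega
    rw [e, pv_plen_nat]
    have : (0:Int) ≤ (Nat.log 10 (items.length - Kb) : Int) := by positivity
    omega
  have hsl : (pvLN items Kb : Int) + 9 ≤ sl := by
    unfold pvFit at hfit; omega
  have hslnn : 0 ≤ sl := by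
    have : (0:Int) ≤ (pvLN items Kb : Int) := by positivity
    omega
  have hlcinn : 0 ≤ lci := by
    have : (0:Int) ≤ (pvLN items Kb : Int) := by positivity
    omega
  have hcut : (PySem.Str.slice (PySem.Str.join ", " items) none (some sl)).toList
      = List.take sl.toNat (PySem.Str.join ", " items).toList := by
    rw [PySem.Str.toList_slice]
    exact PySem.List.slice_to _ hslnn
  have hcut2 : (PySem.Str.slice (PySem.Str.slice (PySem.Str.join ", " items) none (some sl))
        none (some lci)).toList
      = List.take (min lci.toNat sl.toNat) (PySem.Str.join ", " items).toList := by
    rw [PySem.Str.toList_slice]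
    rw [show PySem.Chars.slice ((PySem.Str.slice (PySem.Str.join ", " items) none (some sl)).toList) none (some lci) = List.take lci.toNat ((PySem.Str.slice (PySem.Str.join ", " items) none (some sl)).toList) from PySem.List.slice_to _ hlcinn]
    rw [hcut, List.take_take]
  have hstep := pv_LN_step items (Kb-1) (by omega) (by omega)
  rw [show Kb - 1 + 1 = Kb from by omega] at hstep
  have hidx : pvLN items (Kb-1) + 1 ≤ min lci.toNat sl.toNat := by omega
  have hpref : List.take (pvLN items (Kb-1) + 1) (PySem.Str.join ", " items).toList
      <+: List.take (min lci.toNat sl.toNat) (PySem.Str.join ", " items).toList :=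
    List.take_prefix_take_left hidx
  have hcc := pv_comma_count items (Kb-1) (by omega) (by omega)
  have hcle := List.IsPrefix.count_le ',' hpref
  rw [show PySem.Str.count (PySem.Str.slice (PySem.Str.slice (PySem.Str.join ", " items) none
        (some sl)) none (some lci)) ","
      = PySem.Chars.count ((PySem.Str.slice (PySem.Str.slice (PySem.Str.join ", " items) none
        (some sl)) none (some lci)).toList) [','] from rfl]
  rw [pv_count_eq, hcut2]
  omega

-- ===== VERDICT (by name: the statement is the Claim_ definition above) =====
theorem construct_table_entry_spec : Claim_equal_construct_table_entry := by
  intro items sl hdom hpre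
  unfold Spec_construct_table_entry
  simp only [construct_table_entry, construct_table_entry_alt]
  by_cases h1 : items.length = 1
  · rw [if_pos h1, if_pos h1]
  · simp only [if_neg h1]
    by_cases h2 : PySem.Str.len (PySem.Str.join ", " items) ≤ sl
    · simp only [if_pos h2]
    · simp only [if_neg h2]
      -- hard branch: at least two items and the whole join does not fit
      have hne : items ≠ [] := by
        intro hnil
        subst hnil
        have hz : PySem.Str.len (PySem.Str.join ", " ([] : List String)) = 0 := by
          simp [PySem.Str.join, PySem.Chars.join_nil, PySem.Str.len]
        rw [hz] at h2
        rcases hpre with hp | hp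
        · exact hp rfl
        · exact h2 hp
      have hn2 : 2 ≤ items.length := by
        rcases items with _ | ⟨a, t⟩
        · exact absurd rfl hne
        · simp only [List.length_cons] at h1 ⊢
          omega
      obtain ⟨hr1, hr2, hr3⟩ := pv_fitLoop_spec items sl hn2
      set Kb := pvFitLoop sl ((items.length : Int)) items.dropLast 1 0 0 with hKbdef
      set K' := max 1 Kb with hK'def
      have hK'1 : 1 ≤ K' := le_max_left _ _
      -- B's result is pvMkE items K'
      have hBout : PySem.Str.join ", " (items.take K') ++
          pyPostfixFmt ((items.length : Int) - (K' : Int)) = pvMkE items K' := rfl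
      -- everything above K' does not fit
      have hub : ∀ j, K' < j → j ≤ items.length - 1 → ¬ pvFit items sl j := by
        intro j hj hjn
        by_cases hKb0 : Kb = 0
        · have hb := hr3 (by rw [hKb0]; omega)
          rw [hKb0] at hb
          exact pv_notfit_chain items sl 1 (le_refl _) hb j (by omega) hjn
        · have hK'Kb : K' = Kb := by omega
          have hb := hr3 (by omega)
          exact pv_notfit_chain items sl (Kb + 1) (by omega) hb j (by omega) hjn
      have hbig : ∀ j, K' < j → sl < PySem.Str.len (pvMkE items j) := by
        intro j hj
        by_cases hle : j ≤ items.length - 1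
        · have hnf := hub j hj hle
          unfold pvFit at hnf
          rw [pv_mkE_len items j (by omega) (by omega)]
          omega
        · have htj : items.take j = items := List.take_of_length_le (by omega)
          have hsplit : PySem.Str.len (pvMkE items j)
              = PySem.Str.len (PySem.Str.join ", " items)
                + pvPlen ((items.length : Int) - (j : Int)) := by
            unfold pvMkE
            rw [htj, pv_strlen_append]
            rfl
          have hpn := pv_plen_nonneg ((items.length : Int) - (j : Int))
          omega
      have hstop : PySem.Str.len (pvMkE items K') ≤ sl ∨ K' = 1 := by
        by_cases hKb0 : Kb = 0
        · right; omega
        · left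
          have hK'Kb : K' = Kb := by omega
          have hfitK : pvFit items sl K' := by
            rw [hK'Kb]
            exact hr2 Kb (by omega) (le_refl _)
          unfold pvFit at hfitK
          rw [pv_mkE_len items K' hK'1 (by omega)]
          omega
      by_cases hlci : 0 < PySem.Str.rfind (PySem.Str.slice (PySem.Str.join ", " items) none
          (some sl)) ","
      · simp only [if_pos hlci]
        set nf := PySem.Str.count (PySem.Str.slice (PySem.Str.slice (PySem.Str.join ", " items)
          none (some sl)) none (some (PySem.Str.rfind (PySem.Str.slice
          (PySem.Str.join ", " items) none (some sl)) ","))) "," + 1 with hnfdef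
        have hentry0 : PySem.Str.join ", " (PySem.List.slice items none (some (nf : Int)))
            ++ pyPostfixFmt ((items.length : Int) - (nf : Int)) = pvMkE items nf := by
          rw [PySem.List.slice_to_natCast]
          rfl
        rw [hentry0]
        have hge : K' ≤ nf := by
          by_cases hKb1 : Kb ≤ 1
          · omega
          · have hK'Kb : K' = Kb := by omega
            have hfitKb : pvFit items sl Kb := hr2 Kb (by omega) (le_refl _)
            have := pv_nfit_ge items sl
              (PySem.Str.rfind (PySem.Str.slice (PySem.Str.join ", " items) none (some sl)) ",")
              Kb hn2 (by omega) hr1 hfitKb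
              (pv_lci_ge items sl Kb hn2 (by omega) hr1 hfitKb)
            omega
        rw [pv_whileA_eq items sl K' hK'1 hstop hbig nf hge]
        exact hBout.symm
      · simp only [if_neg hlci]
        have hKb1 : Kb ≤ 1 := by
          by_contra hKbg
          have hfitKb : pvFit items sl Kb := hr2 Kb (by omega) (le_refl _)
          have hlge := pv_lci_ge items sl Kb hn2 (by omega) hr1 hfitKb
          have hLN2 : 2 ≤ pvLN items Kb := by
            have hstep := pv_LN_step items (Kb-1) (by omega) (by omega)
            rw [show Kb - 1 + 1 = Kb from by omega] at hstep
            omega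
          apply hlci
          have : (2 : Int) ≤ (pvLN items Kb : Int) := by exact_mod_cast hLN2
          omega
        have hK'eq : K' = 1 := by omega
        rw [hK'eq]
        rcases items with _ | ⟨a, t⟩
        · exact absurd rfl hne
        · have hget : (PySem.List.pyGet? (a :: t) 0).getD "" = a := by
            simp [PySem.List.pyGet?, PySem.List.pyIdx?]
          have htake : (a :: t).take 1 = [a] := rfl
          have hjoin1 : PySem.Str.join ", " [a] = a := by
            rw [PySem.Str.join]
            simp [PySem.Chars.join_singleton]
          rw [hget, htake, hjoin1]
          norm_num
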